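-- pv_equiv track=rewrite | github.com/jramaswami/Binary_Search_Python | windows.py | solve
-- ===== SOURCE A (Python) =====
-- from collections import defaultdict
--
-- def solve(nums, queries, w):
--     positions = defaultdict(list)
--     for i, n in enumerate(nums):
--         positions[n].append(i)
--
--     soln = [0 for _ in queries]
--
--     for qi, q in enumerate(queries):
--         for pi, p in enumerate(positions[q]):
--             # Compute the minimum starting point for a window that includes
--             # position p.
--             # It must be greater than 0.
--             min_window_start = max(p - w + 1, 0)
--             # It cannot include the previous position with the same number.
--             if pi > 0:
--                 min_window_start = max(positions[q][pi-1]+1, min_window_start)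
--
--             # Compute the maximum window start.  The window cannot extend
--             # past the end of the array.
--             max_window_start = min(p, len(nums) - w)
--
--             # Given the minimum starting window, this position will be in
--             # <max windown start> - <min starting window> as the first
--             # number of its kind.  Count these.
--             window_count = max(max_window_start - min_window_start + 1, 0)
--             soln[qi] += window_count
--     return soln
-- ===== SOURCE B (Python) =====
-- def solve(nums, queries, w):
--     # One pass over nums: accumulate each value's window count as its
--     # positions are seen, then answer every query by a dict lookup.
--     hi_cap = len(nums) - w
--     counts = {}
--     last = {}
--     for i, n in enumerate(nums):
--         lo = max(i - w + 1, 0)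
--         if n in last:
--             lo = max(last[n] + 1, lo)
--         counts[n] = counts.get(n, 0) + max(min(i, hi_cap) - lo + 1, 0)
--         last[n] = i
--     return [counts.get(q, 0) for q in queries]
-- ===== Notes on version B (the rewrite author's own statement) =====
-- stated objective: faster
-- what changed: Instead of grouping all positions per value and then re-scanning the whole position list for every query occurrence, B makes one pass over nums accumulating each value's total window count (tracking only the previous occurrence), so each query is answered by a single dict lookup.
import Mathlib
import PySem

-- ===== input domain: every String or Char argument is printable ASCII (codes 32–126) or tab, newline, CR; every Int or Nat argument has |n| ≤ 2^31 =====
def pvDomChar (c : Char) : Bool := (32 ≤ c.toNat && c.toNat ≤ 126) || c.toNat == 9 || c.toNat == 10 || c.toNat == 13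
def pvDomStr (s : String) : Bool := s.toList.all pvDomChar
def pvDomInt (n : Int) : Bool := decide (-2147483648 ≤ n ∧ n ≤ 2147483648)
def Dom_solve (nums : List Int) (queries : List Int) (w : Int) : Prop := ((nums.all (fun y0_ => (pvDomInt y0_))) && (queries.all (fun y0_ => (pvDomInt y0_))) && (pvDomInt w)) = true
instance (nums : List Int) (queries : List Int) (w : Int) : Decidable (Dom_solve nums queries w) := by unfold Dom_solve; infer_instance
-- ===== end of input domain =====

-- B makes one pass over nums accumulating each value's total window count, answering
-- every query by a single dict lookup (asymptotically faster than A's per-query rescan).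

-- ===== PORT A =====
def solve (nums : List Int) (queries : List Int) (w : Int) : List Int :=
  let positions : PySem.Dict Int (List Int) :=
    (PySem.List.enumerate nums 0).foldl
      (fun d p => d.modify p.2 [] (· ++ [p.1])) PySem.Dict.empty
  let soln : List Int := queries.map (fun _ => (0 : Int))
  (PySem.List.enumerate queries 0).foldl (fun soln qq =>
    let ps := positions.getD qq.2 []
    (PySem.List.enumerate ps 0).foldl (fun soln pp =>
      let mws0 := max (pp.2 - w + 1) 0
      let mws := if pp.1 > 0 then max (PySem.List.pyGetD ps (pp.1 - 1) 0 + 1) mws0 else mws0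
      let maxws := min pp.2 ((nums.length : Int) - w)
      let cnt := max (maxws - mws + 1) 0
      PySem.List.pySetD soln qq.1 (PySem.List.pyGetD soln qq.1 0 + cnt)) soln) soln

-- ===== PORT B =====
def solve_alt (nums : List Int) (queries : List Int) (w : Int) : List Int :=
  let hiCap : Int := (nums.length : Int) - w
  let st :=
    (PySem.List.enumerate nums 0).foldl
      (fun (st : PySem.Dict Int Int × PySem.Dict Int Int) p =>
        let lo0 := max (p.1 - w + 1) 0
        let lo := match st.2.get? p.2 with
          | some pr => max (pr + 1) lo0
          | none => lo0
        (st.1.insert p.2 (st.1.getD p.2 0 + max (min p.1 hiCap - lo + 1) 0),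
         st.2.insert p.2 p.1))
      (PySem.Dict.empty, PySem.Dict.empty)
  queries.map (fun q => st.1.getD q 0)

-- ===== PRECONDITION & SPEC =====
def Spec_solve (nums : List Int) (queries : List Int) (w : Int) (out : List Int) : Prop := out = solve_alt nums queries w
instance (nums : List Int) (queries : List Int) (w : Int) (out : List Int) : Decidable (Spec_solve nums queries w out) := by unfold Spec_solve; infer_instance

-- ===== CLAIM (what is proved, stated in full; the proofs are below) =====
def Claim_equal_solve : Prop := ∀ (nums : List Int) (queries : List Int) (w : Int), Dom_solve nums queries w → Spec_solve nums queries w (solve nums queries w)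

-- ===== LEMMAS AND PROOFS =====

-- positions of value q in nums (A's positions[q]; B's implicit per-value index stream)
def idxOf (nums : List Int) (q : Int) : List Int :=
  ((PySem.List.enumerate nums 0).filter (fun x => x.2 == q)).map (·.1)

-- one position's window count given the previous same-value position
def cntTerm (w cap : Int) (prev : Option Int) (p : Int) : Int :=
  let lo0 := max (p - w + 1) 0
  let lo := match prev with
    | some pr => max (pr + 1) lo0
    | none => lo0
  max (min p cap - lo + 1) 0

-- total window count of a position list, threading the previous position
def sumP (w cap : Int) : Option Int → List Int → Int
  | _, [] => 0
  | prev, p :: ps => cntTerm w cap prev p + sumP w cap (some p) ps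

def Fq (nums : List Int) (w q : Int) : Int :=
  sumP w ((nums.length : Int) - w) none (idxOf nums q)

theorem sumP_append (w cap : Int) (prev : Option Int) (l : List Int) (p : Int) :
    sumP w cap prev (l ++ [p]) =
      sumP w cap prev l +
        cntTerm w cap (match l.getLast? with | some x => some x | none => prev) p := by
  induction l generalizing prev with
  | nil => simp [sumP]
  | cons a l ih =>
    simp only [List.cons_append, sumP, ih (some a)]
    cases l with
    | nil => simp [sumP]
    | cons b l =>
      have h : (b :: l).getLast? = some ((b :: l).getLast (by simp)) := List.getLast?_eq_some_getLast (by simp)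
      simp [h, add_assoc]

-- a loop that only accumulates into one fixed cell collapses to a single update
theorem foldl_pySetD_accum {α : Type} (l : List α) (g : α → Int) (soln : List Int) (qi : Nat) :
    l.foldl (fun s x => PySem.List.pySetD s (qi : Int) (PySem.List.pyGetD s (qi : Int) 0 + g x)) soln
      = PySem.List.pySetD soln (qi : Int) (PySem.List.pyGetD soln (qi : Int) 0 + (l.map g).sum) := by
  induction l generalizing soln with
  | nil =>
    simp only [List.foldl_nil, List.map_nil, List.sum_nil, add_zero,
      PySem.List.pySetD_natCast, PySem.List.pyGetD_natCast]
    by_cases h : qi < soln.length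
    · rw [List.getD_eq_getElem _ _ h, List.set_getElem_self]
    · rw [List.set_eq_of_length_le (by omega)]
  | cons x l ih =>
    simp only [List.foldl_cons, ih, List.map_cons, List.sum_cons]
    by_cases h : qi < soln.length
    · simp [PySem.List.pySetD_natCast, PySem.List.pyGetD_natCast, h,
        List.getElem_set_self, List.set_set]
      ring_nf
    · simp only [PySem.List.pySetD_natCast, List.set_eq_of_length_le (le_of_not_gt h)]

-- A's inner loop body, summed over enumerate(ps), equals the prev-threaded sum
theorem Sa_eq (w cap : Int) (ps : List Int) :
    ((PySem.List.enumerate ps 0).map (fun pp =>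
        max (min pp.2 cap -
            (if pp.1 > 0 then
                max (PySem.List.pyGetD ps (pp.1 - 1) 0 + 1) (max (pp.2 - w + 1) 0)
              else max (pp.2 - w + 1) 0) + 1) 0)).sum
      = sumP w cap none ps := by
  induction ps using List.reverseRecOn with
  | nil => simp [sumP]
  | append_singleton l p ih =>
    rw [PySem.List.enumerate_append, sumP_append, List.map_append, List.sum_append]
    congr 1
    · rw [← ih]
      apply congrArg
      apply List.map_congr_left
      intro pp hpp
      rcases (PySem.List.mem_enumerate_iff _ _ _).1 hpp with ⟨k, hk, rfl⟩
      by_cases hk0 : k = 0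
      · subst hk0; simp
      · have hcast : ((0 : Int) + (k : Int)) - 1 = (((k - 1 : Nat)) : Int) := by omega
        have hlt : (k - 1 : Nat) < l.length := by omega
        simp only [hcast, PySem.List.pyGetD_natCast, List.getD_append _ _ _ _ hlt]
    · simp only [PySem.List.enumerate_cons, PySem.List.enumerate_nil, List.map_cons,
        List.map_nil, List.sum_cons, List.sum_nil, add_zero]
      by_cases hl : l = []
      · subst hl; simp [cntTerm]
      · have hlast : l.getLast? = some (l.getLast hl) := List.getLast?_eq_some_getLast hl
        have hpos : (0 : Int) + (l.length : Int) > 0 := by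
          have := List.length_pos_iff.2 hl; omega
        have hcast : ((0 : Int) + (l.length : Int)) - 1 = (((l.length - 1 : Nat)) : Int) := by
          have := List.length_pos_iff.2 hl; omega
        have hlt : (l.length - 1 : Nat) < l.length := by
          have := List.length_pos_iff.2 hl; omega
        rw [if_pos hpos, hcast]
        simp only [PySem.List.pyGetD_natCast, List.getD_append _ _ _ _ hlt, hlast, cntTerm]
        rw [List.getD_eq_getElem _ _ hlt, List.getLast_eq_getElem]

-- A's positions dict looks up to the per-value index list
theorem positions_getD (nums : List Int) (q : Int) :
    ((PySem.List.enumerate nums 0).foldl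
        (fun d p => d.modify p.2 [] (· ++ [p.1])) PySem.Dict.empty).getD q []
      = idxOf nums q := by
  rw [show (PySem.List.enumerate nums 0).foldl
        (fun d p => d.modify p.2 [] (· ++ [p.1])) PySem.Dict.empty
      = ((PySem.List.enumerate nums 0).map (fun p => (p.2, p.1))).foldl
        (fun d p => d.modify p.1 [] (· ++ [p.2])) PySem.Dict.empty
    from by rw [List.foldl_map]]
  rw [PySem.Dict.getD_foldl_modify_append]
  simp [idxOf, List.filter_map, List.map_map, Function.comp_def]

-- A's outer loop: each iteration adds F q into its own cell of soln
theorem outer_fold (F : Int → Int) (qs : List Int) :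
    ∀ (s : Nat) (pre cur : List Int), pre.length = s → cur.length = qs.length →
      (PySem.List.enumerate qs (s : Int)).foldl
        (fun soln qq => PySem.List.pySetD soln qq.1 (PySem.List.pyGetD soln qq.1 0 + F qq.2))
        (pre ++ cur)
      = pre ++ List.zipWith (fun a q => a + F q) cur qs := by
  induction qs with
  | nil =>
    intro s pre cur _ hc
    simp [List.length_eq_zero_iff.1 hc]
  | cons q qs ih =>
    intro s pre cur hp hc
    cases cur with
    | nil => simp at hc
    | cons c cs =>
      rw [PySem.List.enumerate_cons]
      simp only [List.foldl_cons, PySem.List.pySetD_natCast, PySem.List.pyGetD_natCast]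
      have h1 : (pre ++ c :: cs).getD s 0 = c := by
        subst hp; simp [List.getD_eq_getElem?_getD]
      have h2 : (pre ++ c :: cs).set s (c + F q) = (pre ++ [c + F q]) ++ cs := by
        subst hp; simp
      rw [h1, h2, show ((s : Int) + 1) = ((s + 1 : Nat) : Int) by push_cast; ring]
      rw [ih (s + 1) (pre ++ [c + F q]) cs (by simp [hp]) (by simpa using hc)]
      simp [List.zipWith]

theorem idxOf_append (l : List Int) (n q : Int) :
    idxOf (l ++ [n]) q = idxOf l q ++ (if n = q then [(l.length : Int)] else []) := by
  simp only [idxOf, PySem.List.enumerate_append, PySem.List.enumerate_cons,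
    PySem.List.enumerate_nil, List.filter_append, List.map_append]
  by_cases h : n = q <;> simp [h]

-- B's single pass: counts holds each value's running total, last its last position
theorem B_inv (w cap : Int) (nums : List Int) :
    ∀ q : Int,
      ((PySem.List.enumerate nums 0).foldl
          (fun (st : PySem.Dict Int Int × PySem.Dict Int Int) p =>
            (st.1.insert p.2 (st.1.getD p.2 0 +
                max (min p.1 cap -
                    (match st.2.get? p.2 with
                      | some pr => max (pr + 1) (max (p.1 - w + 1) 0)
                      | none => max (p.1 - w + 1) 0) + 1) 0),
             st.2.insert p.2 p.1))
          (PySem.Dict.empty, PySem.Dict.empty)).1.getD q 0 = sumP w cap none (idxOf nums q)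
      ∧ ((PySem.List.enumerate nums 0).foldl
          (fun (st : PySem.Dict Int Int × PySem.Dict Int Int) p =>
            (st.1.insert p.2 (st.1.getD p.2 0 +
                max (min p.1 cap -
                    (match st.2.get? p.2 with
                      | some pr => max (pr + 1) (max (p.1 - w + 1) 0)
                      | none => max (p.1 - w + 1) 0) + 1) 0),
             st.2.insert p.2 p.1))
          (PySem.Dict.empty, PySem.Dict.empty)).2.get? q = (idxOf nums q).getLast? := by
  induction nums using List.reverseRecOn with
  | nil =>
    intro q
    simp [idxOf, sumP]
  | append_singleton l n ih =>
    intro q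
    rw [PySem.List.enumerate_append, List.foldl_append]
    simp only [PySem.List.enumerate_cons, PySem.List.enumerate_nil, List.foldl_cons,
      List.foldl_nil, idxOf_append]
    obtain ⟨ihc, ihl⟩ := ih q
    obtain ⟨ihcn, ihln⟩ := ih n
    by_cases hq : q = n
    · subst hq
      constructor
      · rw [PySem.Dict.getD_insert_self, ihc, ihln, if_pos rfl, sumP_append]
        congr 1
        cases hgl : (idxOf l q).getLast? <;> simp [cntTerm]
      · rw [PySem.Dict.get?_insert_self, if_pos rfl]
        simp
    · constructor
      · rw [PySem.Dict.getD_insert_of_ne _ _ _ hq, ihc, if_neg (fun h => hq h.symm)]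
        simp
      · rw [PySem.Dict.get?_insert_of_ne _ _ hq, ihl, if_neg (fun h => hq h.symm)]
        simp

theorem zipWith_zero_map (F : Int → Int) (qs : List Int) :
    List.zipWith (fun a q => a + F q) (qs.map fun _ => (0 : Int)) qs
      = qs.map (fun q => F q) := by
  induction qs with
  | nil => rfl
  | cons q qs ih => simp only [List.map_cons, List.zipWith_cons_cons, zero_add, ih]

theorem solveA_eq (nums queries : List Int) (w : Int) :
    solve nums queries w = queries.map (fun q => Fq nums w q) := by
  unfold solve
  rw [PySem.List.foldl_congr_mem (g := fun soln (qq : Int × Int) =>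
    PySem.List.pySetD soln qq.1 (PySem.List.pyGetD soln qq.1 0 + Fq nums w qq.2))]
  · have h := outer_fold (fun q => Fq nums w q) queries 0 [] (queries.map fun _ => (0 : Int))
      rfl (by simp)
    simp only [Nat.cast_zero, List.nil_append] at h
    rw [h, zipWith_zero_map]
  · intro acc qq hqq
    rcases (PySem.List.mem_enumerate_iff _ _ _).1 hqq with ⟨k, hk, rfl⟩
    simp only [show ((0 : Int) + (k : Int)) = ((k : Nat) : Int) by ring]
    rw [foldl_pySetD_accum]
    rw [positions_getD, Sa_eq]
    rfl

theorem solveB_eq (nums queries : List Int) (w : Int) :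
    solve_alt nums queries w = queries.map (fun q => Fq nums w q) := by
  unfold solve_alt
  apply List.map_congr_left
  intro q _
  exact (B_inv w ((nums.length : Int) - w) nums q).1

theorem solve_spec : Claim_equal_solve := by
  intro nums queries w _
  show solve nums queries w = solve_alt nums queries w
  rw [solveA_eq, solveB_eq]
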